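-- pv_equiv track=rewrite | github.com/MontelioneLab/CSP_UBQ | scripts/bmrb_io.py | _row_chain_tag_value
-- ===== SOURCE A (Python) =====
-- from typing import Dict, Tuple, Optional, List, Literal
--
-- def _row_chain_tag_value(row: Dict[str, str]) -> Optional[str]:
--     """Pick a PDB-like chain letter from assigned shift row tags, if present."""
--     best_val: Optional[str] = None
--     best_pri = 99
--     priority = (
--         ("auth_asym_id", 0),
--         ("atom_label_asym_id", 1),
--         ("label_asym_id", 2),
--         ("entity_assembly_label", 3),
--     )
--     for k, val in row.items():
--         if k == "__tags_order__":
--             continue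
--         if val is None or str(val).strip() in ("", ".", "?"):
--             continue
--         kl = k.lower().replace(" ", "")
--         pri = None
--         for subs, p in priority:
--             if subs in kl:
--                 pri = p
--                 break
--         if pri is None and "entity_assembly_id" in kl:
--             # Often numeric oligomer labels — use only if no letter-based tag exists
--             pri = 5
--         if pri is None:
--             continue
--         s = str(val).strip().strip('"').strip("'")
--         if not s:
--             continue
--         if pri < best_pri:
--             best_pri = pri
--             best_val = s
--     # Prefer single-letter / short chain identifiers for protein chains
--     if best_val is not None:
--         # If value looks numeric-only and we might have asym elsewhere, callers still union rows
--         return best_val if len(best_val) <= 4 else best_val[:4]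
--     return None
-- ===== SOURCE B (Python) =====
-- def _row_chain_tag_value(row):
--     """Pick a PDB-like chain letter from assigned shift row tags, if present."""
--
--     def _entry_pri(k):
--         kl = k.lower().replace(" ", "")
--         if "auth_asym_id" in kl:
--             return 0
--         if "atom_label_asym_id" in kl:
--             return 1
--         if "label_asym_id" in kl:
--             return 2
--         if "entity_assembly_label" in kl:
--             return 3
--         if "entity_assembly_id" in kl:
--             return 5
--         return None
--
--     # Outer loop over priority levels; within a level, first row entry wins.
--     for level in (0, 1, 2, 3, 5):
--         for k, val in row.items():
--             if k == "__tags_order__":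
--                 continue
--             if val is None or str(val).strip() in ("", ".", "?"):
--                 continue
--             if _entry_pri(k) != level:
--                 continue
--             s = str(val).strip().strip('"').strip("'")
--             if s:
--                 return s[:4]
--     return None
-- ===== Notes on version B (the rewrite author's own statement) =====
-- stated objective: alternative
-- what changed: B replaces A's single pass tracking a running (best_value, best_priority) pair with an outer loop over the five priority levels in ascending order that rescans the row and returns the first passing entry at the lowest non-empty level, truncated to 4 chars.
import Mathlib
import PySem

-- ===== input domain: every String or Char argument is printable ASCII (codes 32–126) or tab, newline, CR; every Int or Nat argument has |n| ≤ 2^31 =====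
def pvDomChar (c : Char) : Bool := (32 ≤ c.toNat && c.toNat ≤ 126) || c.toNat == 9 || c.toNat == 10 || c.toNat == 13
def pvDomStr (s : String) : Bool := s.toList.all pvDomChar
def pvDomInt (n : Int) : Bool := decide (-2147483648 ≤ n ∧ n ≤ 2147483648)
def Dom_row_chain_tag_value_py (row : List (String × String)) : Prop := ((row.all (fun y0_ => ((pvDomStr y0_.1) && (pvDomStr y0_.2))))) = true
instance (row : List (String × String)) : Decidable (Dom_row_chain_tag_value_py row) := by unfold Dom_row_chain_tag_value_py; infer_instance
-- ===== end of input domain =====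

-- B re-implements the selection as an outer loop over priority levels (first row entry at the
-- lowest level wins, short-circuiting later levels) instead of A's single pass tracking a running
-- best; objective: alternative decomposition, same exact result.

-- ===== PORT A =====
-- loop body of A's single `for k, val in row.items()` pass; state = (best_val, best_pri);
-- `if pri is None: continue` is rendered with Option.elim (none ↦ keep state)
def pvStepA (st : Option String × Int) (kv : String × String) : Option String × Int :=
  if kv.1 == "__tags_order__" then st
  else if PySem.Str.strip kv.2 == "" || PySem.Str.strip kv.2 == "." || PySem.Str.strip kv.2 == "?" then st
  else
    let kl := PySem.Str.replace (PySem.Str.lower kv.1) " " ""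
    -- inner `for subs, p in priority: if subs in kl: pri = p; break`, unrolled in table order
    let pri0 : Option Int :=
      if PySem.Str.isIn "auth_asym_id" kl then some 0
      else if PySem.Str.isIn "atom_label_asym_id" kl then some 1
      else if PySem.Str.isIn "label_asym_id" kl then some 2
      else if PySem.Str.isIn "entity_assembly_label" kl then some 3
      else none
    let pri : Option Int :=
      if pri0 == none && PySem.Str.isIn "entity_assembly_id" kl then some 5 else pri0
    pri.elim st (fun p =>
      let s := PySem.Str.stripChars (PySem.Str.stripChars (PySem.Str.strip kv.2) "\"") "'"
      if s == "" then st
      else if p < st.2 then (some s, p) else st)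

def row_chain_tag_value_py (row : List (String × String)) : Option String :=
  let st := row.foldl pvStepA (none, 99)
  match st.1 with
  | some bv => if PySem.Str.len bv ≤ 4 then some bv else some (PySem.Str.slice bv none (some 4))
  | none => none

-- ===== PORT B =====
-- B's helper `_entry_pri(k)`
def pvEntryPri (k : String) : Option Int :=
  let kl := PySem.Str.replace (PySem.Str.lower k) " " ""
  if PySem.Str.isIn "auth_asym_id" kl then some 0
  else if PySem.Str.isIn "atom_label_asym_id" kl then some 1
  else if PySem.Str.isIn "label_asym_id" kl then some 2
  else if PySem.Str.isIn "entity_assembly_label" kl then some 3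
  else if PySem.Str.isIn "entity_assembly_id" kl then some 5
  else none

-- B's inner `for k, val in row.items()` scan at one priority level (early return = some)
def pvLevelScan (level : Int) : List (String × String) → Option String
  | [] => none
  | kv :: rest =>
    if kv.1 == "__tags_order__" then pvLevelScan level rest
    else if PySem.Str.strip kv.2 == "" || PySem.Str.strip kv.2 == "." || PySem.Str.strip kv.2 == "?" then pvLevelScan level rest
    else if pvEntryPri kv.1 != some level then pvLevelScan level rest
    else
      let s := PySem.Str.stripChars (PySem.Str.stripChars (PySem.Str.strip kv.2) "\"") "'"
      if s == "" then pvLevelScan level rest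
      else some (PySem.Str.slice s none (some 4))

-- B's outer `for level in (0, 1, 2, 3, 5)` with early return
def row_chain_tag_value_py_alt (row : List (String × String)) : Option String :=
  ([0, 1, 2, 3, 5] : List Int).foldl
    (fun acc level => match acc with | some v => some v | none => pvLevelScan level row) none

-- ===== PRECONDITION & SPEC =====
def Spec_row_chain_tag_value_py (row : List (String × String)) (out : Option String) : Prop := out = row_chain_tag_value_py_alt row
instance (row : List (String × String)) (out : Option String) : Decidable (Spec_row_chain_tag_value_py row out) := by unfold Spec_row_chain_tag_value_py; infer_instance

-- ===== CLAIM (what is proved, stated in full; the proofs are below) =====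
def Claim_equal_row_chain_tag_value_py : Prop := ∀ (row : List (String × String)), Dom_row_chain_tag_value_py row → Spec_row_chain_tag_value_py row (row_chain_tag_value_py row)

-- ===== LEMMAS AND PROOFS =====

-- the per-entry candidate both programs filter out: (priority, doubly-stripped value), none if skipped
def pvCand (kv : String × String) : Option (Int × String) :=
  if kv.1 == "__tags_order__" then none
  else if PySem.Str.strip kv.2 == "" || PySem.Str.strip kv.2 == "." || PySem.Str.strip kv.2 == "?" then none
  else (pvEntryPri kv.1).bind (fun p =>
    let s := PySem.Str.stripChars (PySem.Str.stripChars (PySem.Str.strip kv.2) "\"") "'"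
    if s == "" then none else some (p, s))

lemma pvStepA_eq (st : Option String × Int) (kv : String × String) :
    pvStepA st kv = match pvCand kv with
      | none => st
      | some ps => if ps.1 < st.2 then (some ps.2, ps.1) else st := by
  simp only [pvStepA, pvCand, pvEntryPri]
  generalize (PySem.Str.stripChars (PySem.Str.stripChars (PySem.Str.strip kv.2) "\"") "'") = sv
  generalize (sv == "") = c7
  generalize ((kv.1 == "__tags_order__") : Bool) = c0
  generalize ((PySem.Str.strip kv.2 == "" || PySem.Str.strip kv.2 == "." || PySem.Str.strip kv.2 == "?") : Bool) = c1
  generalize (PySem.Str.isIn "auth_asym_id" (PySem.Str.replace (PySem.Str.lower kv.1) " " "")) = c2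
  generalize (PySem.Str.isIn "atom_label_asym_id" (PySem.Str.replace (PySem.Str.lower kv.1) " " "")) = c3
  generalize (PySem.Str.isIn "label_asym_id" (PySem.Str.replace (PySem.Str.lower kv.1) " " "")) = c4
  generalize (PySem.Str.isIn "entity_assembly_label" (PySem.Str.replace (PySem.Str.lower kv.1) " " "")) = c5
  generalize (PySem.Str.isIn "entity_assembly_id" (PySem.Str.replace (PySem.Str.lower kv.1) " " "")) = c6
  cases c0 <;> cases c1 <;> cases c2 <;> cases c3 <;> cases c4 <;> cases c5 <;> cases c6 <;> cases c7 <;> rfl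

lemma pvLevelScan_cons (level : Int) (kv : String × String) (rest : List (String × String)) :
    pvLevelScan level (kv :: rest) = match pvCand kv with
      | none => pvLevelScan level rest
      | some ps => if ps.1 = level then some (PySem.Str.slice ps.2 none (some 4))
                   else pvLevelScan level rest := by
  simp only [pvLevelScan, pvCand, pvEntryPri]
  generalize (PySem.Str.stripChars (PySem.Str.stripChars (PySem.Str.strip kv.2) "\"") "'") = sv
  generalize (sv == "") = c7
  generalize ((kv.1 == "__tags_order__") : Bool) = c0
  generalize ((PySem.Str.strip kv.2 == "" || PySem.Str.strip kv.2 == "." || PySem.Str.strip kv.2 == "?") : Bool) = c1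
  generalize (PySem.Str.isIn "auth_asym_id" (PySem.Str.replace (PySem.Str.lower kv.1) " " "")) = c2
  generalize (PySem.Str.isIn "atom_label_asym_id" (PySem.Str.replace (PySem.Str.lower kv.1) " " "")) = c3
  generalize (PySem.Str.isIn "label_asym_id" (PySem.Str.replace (PySem.Str.lower kv.1) " " "")) = c4
  generalize (PySem.Str.isIn "entity_assembly_label" (PySem.Str.replace (PySem.Str.lower kv.1) " " "")) = c5
  generalize (PySem.Str.isIn "entity_assembly_id" (PySem.Str.replace (PySem.Str.lower kv.1) " " "")) = c6
  generalize pvLevelScan level rest = r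
  cases c0 <;> cases c1 <;> cases c2 <;> cases c3 <;> cases c4 <;> cases c5 <;> cases c6 <;> cases c7 <;>
    first
    | rfl
    | (simp only [Option.bind, bne_iff_ne, ne_eq, ite_not]; split_ifs <;> simp_all)

-- generic priority-range fact
lemma pvGenCand (c0 c1 c2 c3 c4 c5 c6 c7 : Bool) (s : String) (q : Int × String) :
    (if c0 = true then none
     else if c1 = true then none
     else Option.bind (if c2 = true then some (0:Int)
           else if c3 = true then some 1
           else if c4 = true then some 2
           else if c5 = true then some 3
           else if c6 = true then some 5
           else none) (fun p => if c7 = true then none else some (p, s))) = some q →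
    q.1 = 0 ∨ q.1 = 1 ∨ q.1 = 2 ∨ q.1 = 3 ∨ q.1 = 5 := by
  cases c0 <;> cases c1 <;> cases c2 <;> cases c3 <;> cases c4 <;> cases c5 <;> cases c6 <;> cases c7 <;>
    intro h <;> simp_all <;> subst h <;> simp

lemma pvCand_pri (kv : String × String) (q : Int × String) (h : pvCand kv = some q) :
    q.1 = 0 ∨ q.1 = 1 ∨ q.1 = 2 ∨ q.1 = 3 ∨ q.1 = 5 := by
  simp only [pvCand, pvEntryPri] at h
  exact pvGenCand _ _ _ _ _ _ _ _ _ q h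

-- trace of A's running best: the (pri, stripped value) pair A ends with, given current best_pri bp
def pvFirstMin (bp : Int) : List (String × String) → Option (Int × String)
  | [] => none
  | kv :: rest =>
    (pvCand kv).elim (pvFirstMin bp rest) (fun ps =>
      if ps.1 < bp then (pvFirstMin ps.1 rest).elim (some ps) some
      else pvFirstMin bp rest)

lemma foldA_char (row : List (String × String)) : ∀ st : Option String × Int,
    row.foldl pvStepA st = match pvFirstMin st.2 row with
      | none => st
      | some ps => (some ps.2, ps.1) := by
  induction row with
  | nil => intro st; simp [pvFirstMin]
  | cons kv rest ih =>
    intro st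
    rw [List.foldl_cons, pvStepA_eq]
    cases hc : pvCand kv with
    | none => simp only [pvFirstMin, hc, Option.elim]; exact ih st
    | some ps =>
      simp only [pvFirstMin, hc, Option.elim]
      by_cases hlt : ps.1 < st.2
      · simp only [if_pos hlt]
        rw [ih (some ps.2, ps.1)]
        cases pvFirstMin ps.1 rest <;> rfl
      · simp only [if_neg hlt]
        exact ih st

lemma pvFirstMin_mem (row : List (String × String)) : ∀ bp ps, pvFirstMin bp row = some ps →
    ps.1 = 0 ∨ ps.1 = 1 ∨ ps.1 = 2 ∨ ps.1 = 3 ∨ ps.1 = 5 := by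
  induction row with
  | nil => intro bp ps h; simp [pvFirstMin] at h
  | cons kv rest ih =>
    intro bp ps h
    cases hc : pvCand kv with
    | none =>
      simp only [pvFirstMin, hc, Option.elim] at h
      exact ih bp ps h
    | some q =>
      simp only [pvFirstMin, hc, Option.elim] at h
      split_ifs at h with hlt
      · cases hf : pvFirstMin q.1 rest with
        | none =>
          rw [hf] at h
          simp only [Option.some.injEq] at h
          exact h ▸ pvCand_pri kv q hc
        | some r =>
          rw [hf] at h
          simp only [Option.some.injEq] at h
          exact h ▸ ih q.1 r hf
      · exact ih bp ps h

lemma pvFirstMin_char (row : List (String × String)) : ∀ bp : Int,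
    (∀ ps, pvFirstMin bp row = some ps →
      ps.1 < bp ∧ pvLevelScan ps.1 row = some (PySem.Str.slice ps.2 none (some 4)) ∧
      ∀ q, q < ps.1 → pvLevelScan q row = none)
    ∧ (pvFirstMin bp row = none → ∀ q, q < bp → pvLevelScan q row = none) := by
  induction row with
  | nil =>
    intro bp
    refine ⟨fun ps h => by simp [pvFirstMin] at h, fun _ q _ => rfl⟩
  | cons kv rest ih =>
    intro bp
    cases hc : pvCand kv with
    | none =>
      constructor
      · intro ps h
        simp only [pvFirstMin, hc, Option.elim] at h
        obtain ⟨h1, h2, h3⟩ := (ih bp).1 ps h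
        refine ⟨h1, ?_, fun q hq => ?_⟩
        · rw [pvLevelScan_cons, hc]; exact h2
        · rw [pvLevelScan_cons, hc]; exact h3 q hq
      · intro h q hq
        simp only [pvFirstMin, hc, Option.elim] at h
        rw [pvLevelScan_cons, hc]
        exact (ih bp).2 h q hq
    | some ps0 =>
      by_cases hlt : ps0.1 < bp
      · constructor
        · intro ps h
          simp only [pvFirstMin, hc, Option.elim, if_pos hlt] at h
          cases hf : pvFirstMin ps0.1 rest with
          | none =>
            rw [hf] at h
            simp only [Option.some.injEq] at h
            subst h
            refine ⟨hlt, ?_, fun q hq => ?_⟩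
            · rw [pvLevelScan_cons, hc]
              simp
            · rw [pvLevelScan_cons, hc]
              have hne : ¬ ps0.1 = q := by omega
              simp only [hne, if_false]
              exact (ih ps0.1).2 hf q hq
          | some r =>
            rw [hf] at h
            simp only [Option.some.injEq] at h
            subst h
            obtain ⟨h1, h2, h3⟩ := (ih ps0.1).1 r hf
            refine ⟨lt_trans h1 hlt, ?_, fun q hq => ?_⟩
            · rw [pvLevelScan_cons, hc]
              have hne : ¬ ps0.1 = r.1 := by omega
              simp only [hne, if_false]
              exact h2
            · rw [pvLevelScan_cons, hc]
              have hne : ¬ ps0.1 = q := by omega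
              simp only [hne, if_false]
              exact h3 q hq
        · intro h
          simp only [pvFirstMin, hc, Option.elim, if_pos hlt] at h
          cases hf : pvFirstMin ps0.1 rest <;> rw [hf] at h <;> simp at h
      · constructor
        · intro ps h
          simp only [pvFirstMin, hc, Option.elim, if_neg hlt] at h
          obtain ⟨h1, h2, h3⟩ := (ih bp).1 ps h
          refine ⟨h1, ?_, fun q hq => ?_⟩
          · rw [pvLevelScan_cons, hc]
            have hne : ¬ ps0.1 = ps.1 := by omega
            simp only [hne, if_false]
            exact h2
          · rw [pvLevelScan_cons, hc]
            have hne : ¬ ps0.1 = q := by omega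
            simp only [hne, if_false]
            exact h3 q hq
        · intro h q hq
          simp only [pvFirstMin, hc, Option.elim, if_neg hlt] at h
          rw [pvLevelScan_cons, hc]
          have hne : ¬ ps0.1 = q := by omega
          simp only [hne, if_false]
          exact (ih bp).2 h q hq

lemma pvSlice4_of_short (s : String) (h : PySem.Str.len s ≤ 4) :
    PySem.Str.slice s none (some 4) = s := by
  apply String.toList_inj.mp
  rw [PySem.Str.toList_slice]
  have h4 : s.toList.length ≤ 4 := by
    simp only [PySem.Str.len] at h
    exact_mod_cast h
  rw [PySem.Chars.slice_eq_listSlice, PySem.List.slice_to s.toList (by norm_num : (0:Int) ≤ 4)]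
  exact List.take_of_length_le (by simpa using h4)

-- ===== VERDICT (by name: the statement is the Claim_ definition above) =====
theorem row_chain_tag_value_py_spec : Claim_equal_row_chain_tag_value_py := by
  intro row _
  unfold Spec_row_chain_tag_value_py row_chain_tag_value_py row_chain_tag_value_py_alt
  rw [foldA_char row (none, 99)]
  cases hf : pvFirstMin 99 row with
  | none =>
    have hn := (pvFirstMin_char row 99).2 hf
    simp only [List.foldl, hn 0 (by norm_num), hn 1 (by norm_num), hn 2 (by norm_num),
      hn 3 (by norm_num), hn 5 (by norm_num)]
  | some ps =>
    obtain ⟨-, h2, h3⟩ := (pvFirstMin_char row 99).1 ps hf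
    have hA : (if PySem.Str.len ps.2 ≤ 4 then some ps.2
        else some (PySem.Str.slice ps.2 none (some 4))) = some (PySem.Str.slice ps.2 none (some 4)) := by
      split_ifs with h
      · rw [pvSlice4_of_short ps.2 h]
      · rfl
    rcases pvFirstMin_mem row 99 ps hf with h0 | h0 | h0 | h0 | h0 <;>
      rw [h0] at h2 <;>
      first
      | (simp only [List.foldl, h3 0 (by omega), h3 1 (by omega), h3 2 (by omega),
            h3 3 (by omega), h2]; exact hA)
      | (simp only [List.foldl, h3 0 (by omega), h3 1 (by omega), h3 2 (by omega), h2];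
         exact hA)
      | (simp only [List.foldl, h3 0 (by omega), h3 1 (by omega), h2]; exact hA)
      | (simp only [List.foldl, h3 0 (by omega), h2]; exact hA)
      | (simp only [List.foldl, h2]; exact hA)
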